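-- pv_equiv track=rewrite | github.com/Deriverx2/python_lab_ | labcycle1/question1/lc1_q1.py | digit_difference
-- ===== SOURCE A (Python) =====
-- def digit_difference(n):
--   p=n
--   op=1
--   ep=1
--   d=1
--   while p>0:
--     i=p%10
--     p=p//10
--     if d%2==0:
--       ep=ep*i
--     else:
--       op=op*i
--     d=d+1
--   s=ep-op
--   return s
-- ===== SOURCE B (Python) =====
-- def digit_difference(n):
--     # Recursive decomposition: go(p) returns (op, ep) for the digits of p,
--     # swapping the two products at each level instead of tracking a position counter.
--     def go(p):
--         if p <= 0:
--             return (1, 1)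
--         a, b = go(p // 10)
--         return (b * (p % 10), a)
--     op, ep = go(n)
--     return ep - op
-- ===== Notes on version B (the rewrite author's own statement) =====
-- stated objective: simpler
-- what changed: Replaces A's iterative loop with a position-parity counter and branch by a recursion over the digits that returns both products and swaps their roles at each level, eliminating the counter and the parity test.
import Mathlib
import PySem

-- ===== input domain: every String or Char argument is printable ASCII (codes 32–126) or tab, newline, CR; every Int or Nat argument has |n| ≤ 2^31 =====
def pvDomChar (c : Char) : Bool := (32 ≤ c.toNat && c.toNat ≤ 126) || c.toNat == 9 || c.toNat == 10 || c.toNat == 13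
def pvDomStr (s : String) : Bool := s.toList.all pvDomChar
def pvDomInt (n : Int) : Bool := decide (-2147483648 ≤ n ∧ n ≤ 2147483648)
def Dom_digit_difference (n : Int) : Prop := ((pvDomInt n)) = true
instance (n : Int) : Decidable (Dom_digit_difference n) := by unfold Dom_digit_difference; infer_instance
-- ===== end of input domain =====

-- B replaces A's parity-counter loop by a recursion over the digits that swaps the
-- two running products at each level (objective: simpler — no position counter, no branch).

-- ===== PORT A =====
-- A's while loop: state (p, op, ep, d); terminates because p//10 < p for p > 0.
def digit_difference_loop (p op ep d : Int) : Int :=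
  if hp : p > 0 then
    let i := PySem.Int.mod p 10
    let p' := PySem.Int.floordiv p 10
    if PySem.Int.mod d 2 = 0 then
      digit_difference_loop p' op (ep * i) (d + 1)
    else
      digit_difference_loop p' (op * i) ep (d + 1)
  else
    ep - op
termination_by p.toNat
decreasing_by
  all_goals
    simp only [PySem.Int.floordiv_eq_ediv_of_pos (by omega : (0:Int) < 10)]
    omega

def digit_difference (n : Int) : Int :=
  digit_difference_loop n 1 1 1

-- ===== PORT B =====
-- B's helper go(p): returns (op, ep) for p's digits, swapping at each level.
def digit_difference_go (p : Int) : Int × Int :=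
  if _hp : p ≤ 0 then (1, 1)
  else
    let q := digit_difference_go (PySem.Int.floordiv p 10)
    (q.2 * PySem.Int.mod p 10, q.1)
termination_by p.toNat
decreasing_by
  simp only [PySem.Int.floordiv_eq_ediv_of_pos (by omega : (0:Int) < 10)]
  omega

def digit_difference_alt (n : Int) : Int :=
  (digit_difference_go n).2 - (digit_difference_go n).1

-- ===== PRECONDITION & SPEC =====
def Spec_digit_difference (n : Int) (out : Int) : Prop := out = digit_difference_alt n
instance (n : Int) (out : Int) : Decidable (Spec_digit_difference n out) := by unfold Spec_digit_difference; infer_instance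

-- ===== CLAIM (what is proved, stated in full; the proofs are below) =====
def Claim_equal_digit_difference : Prop := ∀ (n : Int), Dom_digit_difference n → Spec_digit_difference n (digit_difference n)

-- ===== LEMMAS AND PROOFS =====

-- Loop invariant: A's loop with counter d equals ep/op times B's two products,
-- with the roles of the two products determined by the parity of d.
theorem digit_difference_loop_eq (k : Nat) :
    ∀ (p op ep d : Int), p.toNat ≤ k →
      digit_difference_loop p op ep d =
        if PySem.Int.mod d 2 = 0 then
          ep * (digit_difference_go p).1 - op * (digit_difference_go p).2
        else
          ep * (digit_difference_go p).2 - op * (digit_difference_go p).1 := by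
  induction k with
  | zero =>
    intro p op ep d hk
    have hp : ¬ p > 0 := by omega
    have hp' : p ≤ 0 := by omega
    rw [digit_difference_loop, digit_difference_go, dif_neg hp, dif_pos hp']
    split <;> simp
  | succ m ih =>
    intro p op ep d hk
    rw [digit_difference_loop, digit_difference_go]
    by_cases hp : p > 0
    · have hple : ¬ p ≤ 0 := by omega
      rw [dif_pos hp, dif_neg hple]
      have hdec : (PySem.Int.floordiv p 10).toNat ≤ m := by
        rw [PySem.Int.floordiv_eq_ediv_of_pos (by omega : (0:Int) < 10)]
        omega
      have hmod : PySem.Int.mod d 2 = d % 2 :=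
        PySem.Int.mod_eq_emod_of_pos (by omega : (0:Int) < 2)
      have hmod1 : PySem.Int.mod (d + 1) 2 = (d + 1) % 2 :=
        PySem.Int.mod_eq_emod_of_pos (by omega : (0:Int) < 2)
      by_cases hd : PySem.Int.mod d 2 = 0
      · have hd1 : ¬ PySem.Int.mod (d + 1) 2 = 0 := by
          rw [hmod1]; rw [hmod] at hd; omega
        rw [if_pos hd, if_pos hd,
          ih _ op (ep * PySem.Int.mod p 10) (d + 1) hdec, if_neg hd1]
        dsimp only
        ring
      · have hd1 : PySem.Int.mod (d + 1) 2 = 0 := by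
          rw [hmod1]; rw [hmod] at hd; omega
        rw [if_neg hd, if_neg hd,
          ih _ (op * PySem.Int.mod p 10) ep (d + 1) hdec, if_pos hd1]
        dsimp only
        ring
    · have hple : p ≤ 0 := by omega
      rw [dif_neg hp, dif_pos hple]
      split <;> simp

-- ===== VERDICT (by name: the statement is the Claim_ definition above) =====
theorem digit_difference_spec : Claim_equal_digit_difference := by
  intro n _
  unfold Spec_digit_difference digit_difference digit_difference_alt
  have h := digit_difference_loop_eq n.toNat n 1 1 1 (le_refl _)
  have h1 : PySem.Int.mod (1:Int) 2 = 1 := by decide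
  rw [h, h1]
  simp
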